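-- pv_equiv track=rewrite | github.com/DewPeaceTigers/AlgorithmStudy | weeks/week_31/PG_42586/minji.py | solution
-- ===== SOURCE A (Python) =====
-- import math
--
-- def solution(progresses, speeds):
--     times = []
--     answer = []
--     for i in range(len(progresses)):
--         times.append(math.ceil((100 - progresses[i]) / speeds[i]))
--
--     before = times[0]
--     count = 1
--     for i in range(1, len(times)):
--         if before >= times[i]:
--             count += 1
--         else:
--             before = times[i]
--             answer.append(count)
--             count = 1
--     if count > 0:
--         answer.append(count)
--     return answer
-- ===== SOURCE B (Python) =====
-- import math
--
-- def solution(progresses, speeds):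
--     times = [math.ceil((100 - p) / s) for p, s in zip(progresses, speeds)]
--
--     def rec(lo, hi):
--         # record positions (strict prefix maxima) of times[lo:hi], and the slice maximum
--         if hi - lo == 1:
--             return [lo], times[lo]
--         mid = (lo + hi) // 2
--         lrec, lmax = rec(lo, mid)
--         rrec, rmax = rec(mid, hi)
--         return lrec + [i for i in rrec if times[i] > lmax], max(lmax, rmax)
--
--     starts, _ = rec(0, len(times))
--     starts.append(len(times))
--     return [b - a for a, b in zip(starts, starts[1:])]
-- ===== Notes on version B (the rewrite author's own statement) =====
-- stated objective: alternative
-- what changed: B replaces A's linear before/count state machine by a divide-and-conquer recursion: it recursively computes the strict prefix-maxima record positions (= batch starts) and the maximum of each half, merges them by filtering the right half's records against the left maximum, and finally returns consecutive differences of the boundary positions.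
import Mathlib
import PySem

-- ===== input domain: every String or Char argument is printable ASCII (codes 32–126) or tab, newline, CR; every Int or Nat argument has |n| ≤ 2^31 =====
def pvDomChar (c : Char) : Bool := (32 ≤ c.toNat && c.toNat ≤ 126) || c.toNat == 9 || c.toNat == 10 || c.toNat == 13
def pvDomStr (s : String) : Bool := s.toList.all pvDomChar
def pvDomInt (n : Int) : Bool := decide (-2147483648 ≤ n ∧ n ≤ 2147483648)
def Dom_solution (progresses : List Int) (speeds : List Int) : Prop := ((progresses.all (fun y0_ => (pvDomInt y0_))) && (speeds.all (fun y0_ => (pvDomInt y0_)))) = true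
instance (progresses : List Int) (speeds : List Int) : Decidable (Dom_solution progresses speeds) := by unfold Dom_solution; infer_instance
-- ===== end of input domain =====

-- B computes batch starts (strict prefix-maxima record positions) by divide and conquer and
-- returns their consecutive differences; A is a linear before/count state machine.
-- Equivalence is claimed on Pre_ (nonempty progresses, enough nonzero speeds), where A returns normally.

-- math.ceil((100-p)/s): exact integer ceiling division; exact for Python's float division
-- because |100-p| ≤ 2^31+100 < 2^53 on Dom_, so float rounding never crosses an integer.
def ceilDiv (a b : Int) : Int := -(PySem.Int.floordiv (-a) b)

-- ===== PORT A =====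
def solution (progresses : List Int) (speeds : List Int) : List Int :=
  let times := (PySem.List.pyRange 0 (progresses.length : Int) 1).foldl
    (fun ts i => ts ++ [ceilDiv (100 - PySem.List.pyGetD progresses i 0) (PySem.List.pyGetD speeds i 0)]) []
  let before := PySem.List.pyGetD times 0 0
  let st := (PySem.List.pyRange 1 (times.length : Int) 1).foldl
    (fun (st : Int × Int × List Int) i =>
      if st.1 ≥ PySem.List.pyGetD times i 0 then (st.1, st.2.1 + 1, st.2.2)
      else (PySem.List.pyGetD times i 0, 1, st.2.2 ++ [st.2.1]))
    (before, 1, [])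
  if st.2.1 > 0 then st.2.2 ++ [st.2.1] else st.2.2

-- ===== PORT B =====
-- rec(lo, hi) of Source B: record positions of times[lo:hi] and the slice maximum, by halving.
-- The 'hi - lo ≤ 0' guard only makes the recursion total (Python diverges there; never
-- reached from solution_alt on Pre_ inputs).
def recB (times : List Int) (lo hi : Int) : List Int × Int :=
  if _h0 : hi - lo ≤ 0 then ([], 0)
  else if _h1 : hi - lo = 1 then ([lo], PySem.List.pyGetD times lo 0)
  else
    let mid := PySem.Int.floordiv (lo + hi) 2
    let l := recB times lo mid
    let r := recB times mid hi
    (l.1 ++ r.1.filter (fun i => decide (l.2 < PySem.List.pyGetD times i 0)), max l.2 r.2)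
termination_by (hi - lo).toNat
decreasing_by
  all_goals
    have hm : PySem.Int.floordiv (lo + hi) 2 = (lo + hi) / 2 :=
      PySem.Int.floordiv_eq_ediv_of_pos (by norm_num)
    omega

def solution_alt (progresses : List Int) (speeds : List Int) : List Int :=
  let times := (progresses.zip speeds).map (fun ps => ceilDiv (100 - ps.1) ps.2)
  let st := recB times 0 (times.length : Int)
  let starts := st.1 ++ [(times.length : Int)]
  (starts.zip (PySem.List.slice starts (some 1) none)).map (fun ab => ab.2 - ab.1)

-- ===== PRECONDITION & SPEC =====
-- Pre_ excludes exactly the inputs where A raises: empty progresses (IndexError on times[0]),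
-- speeds shorter than progresses (IndexError), and a zero among the used speeds (ZeroDivisionError).
def Pre_solution (progresses : List Int) (speeds : List Int) : Prop :=
  progresses ≠ [] ∧ progresses.length ≤ speeds.length ∧
    ∀ s ∈ speeds.take progresses.length, s ≠ 0
instance (progresses : List Int) (speeds : List Int) : Decidable (Pre_solution progresses speeds) := by unfold Pre_solution; infer_instance

def pvWitness_solution : List Int × List Int := ([93, 30, 55], [1, 30, 5])

def Spec_solution (progresses : List Int) (speeds : List Int) (out : List Int) : Prop := out = solution_alt progresses speeds
instance (progresses : List Int) (speeds : List Int) (out : List Int) : Decidable (Spec_solution progresses speeds out) := by unfold Spec_solution; infer_instance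

-- ===== CLAIM (what is proved, stated in full; the proofs are below) =====
def Claim_equal_solution : Prop := ∀ (progresses : List Int) (speeds : List Int), Dom_solution progresses speeds → Pre_solution progresses speeds → Spec_solution progresses speeds (solution progresses speeds)

-- ===== LEMMAS AND PROOFS =====

-- common reference recursion: batch sizes from a running maximum b and current count c
def goBatch : Int → Int → List Int → List Int
  | _, c, [] => [c]
  | b, c, t :: ts => if b ≥ t then goBatch b (c + 1) ts else c :: goBatch t 1 ts

-- consecutive differences
def diffs (xs : List Int) : List Int := (xs.zip xs.tail).map (fun ab => ab.2 - ab.1)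

-- record positions over (index, value) pairs, running maximum m
def recsP : Int → List (Int × Int) → List Int
  | _, [] => []
  | m, p :: ps => if m < p.2 then p.1 :: recsP p.2 ps else recsP m ps

-- record positions with the first element always a record
def recs0 : List (Int × Int) → List Int
  | [] => []
  | p :: ps => p.1 :: recsP p.2 ps

-- maximum of the values of a nonempty pair list
def maxP : List (Int × Int) → Int
  | [] => 0
  | p :: ps => ps.foldl (fun a q => max a q.2) p.2

lemma diffs_append_last (s : List Int) (l x : Int) :
    diffs (s ++ [l, x]) = diffs (s ++ [l]) ++ [x - l] := by
  induction s with
  | nil => rfl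
  | cons a s ih =>
    cases s with
    | nil => rfl
    | cons b s =>
      simp only [diffs, List.cons_append, List.tail_cons, List.zip_cons_cons, List.map_cons] at *
      simpa using ih

-- A's first loop builds the same times list as B's zip comprehension
lemma times_loop (g : Int → Int → Int) :
    ∀ (ps ss P S acc : List Int), P.length = S.length → ps.length ≤ ss.length →
    (PySem.List.pyRange (P.length : Int) ((P.length : Int) + (ps.length : Int)) 1).foldl
      (fun ts i => ts ++ [g (PySem.List.pyGetD (P ++ ps) i 0) (PySem.List.pyGetD (S ++ ss) i 0)]) acc
    = acc ++ (ps.zip ss).map (fun q => g q.1 q.2) := by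
  intro ps
  induction ps with
  | nil => intro ss P S acc _ _; simp [PySem.List.pyRange_one_eq_nil]
  | cons p ps ih =>
    intro ss P S acc hPS hlen
    cases ss with
    | nil => simp at hlen
    | cons s ss =>
      rw [PySem.List.pyRange_one_cons (by push_cast [List.length_cons]; omega)]
      simp only [List.foldl_cons]
      have h1 : PySem.List.pyGetD (P ++ p :: ps) (P.length : Int) 0 = p := by
        simp [PySem.List.pyGetD_natCast, List.getD]
      have h2 : PySem.List.pyGetD (S ++ s :: ss) (P.length : Int) 0 = s := by
        rw [hPS]; simp [PySem.List.pyGetD_natCast, List.getD]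
      rw [h1, h2]
      have := ih ss (P ++ [p]) (S ++ [s]) (acc ++ [g p s])
        (by simp [hPS]) (by simpa using hlen)
      simp only [List.append_assoc, List.singleton_append, List.length_append,
        List.length_singleton] at this ⊢
      rw [show ((P.length : Int) + ((p :: ps).length : Int) : Int)
            = ((P.length + 1 : Nat) : Int) + (ps.length : Int) by push_cast [List.length_cons]; ring]
      push_cast at this ⊢
      rw [this]
      simp [List.zip_cons_cons]

-- A's accumulation loop computes goBatch
lemma foldA_goBatch :
    ∀ (ts : List Int) (b c : Int) (ans : List Int), 1 ≤ c →
    (let st := ts.foldl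
        (fun (st : Int × Int × List Int) t =>
          if st.1 ≥ t then (st.1, st.2.1 + 1, st.2.2)
          else (t, 1, st.2.2 ++ [st.2.1])) (b, c, ans)
     if st.2.1 > 0 then st.2.2 ++ [st.2.1] else st.2.2)
    = ans ++ goBatch b c ts := by
  intro ts
  induction ts with
  | nil => intro b c ans hc; simp [goBatch]; omega
  | cons t ts ih =>
    intro b c ans hc
    simp only [List.foldl_cons, goBatch]
    by_cases h : b ≥ t
    · simp only [if_pos h]
      exact ih b (c + 1) ans (by omega)
    · simp only [if_neg h]
      rw [ih t 1 (ans ++ [c]) le_rfl]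
      simp

-- every record position wrt threshold m has a value above m
lemma recsP_val_gt (times : List Int) :
    ∀ (ps : List (Int × Int)) (m j : Int),
    (∀ p ∈ ps, PySem.List.pyGetD times p.1 0 = p.2) →
    j ∈ recsP m ps → m < PySem.List.pyGetD times j 0 := by
  intro ps
  induction ps with
  | nil => intro m j _ hj; simp [recsP] at hj
  | cons p ps ih =>
    intro m j H hj
    simp only [recsP] at hj
    by_cases h : m < p.2
    · rw [if_pos h] at hj
      rcases List.mem_cons.mp hj with rfl | hj
      · rw [H p (by simp)]; exact h
      · exact lt_trans h (ih p.2 j (fun q hq => H q (by simp [hq])) hj)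
    · rw [if_neg h] at hj
      exact ih m j (fun q hq => H q (by simp [hq])) hj

-- filtering records wrt a lower threshold by '> m' gives records wrt m
lemma recsP_filter (times : List Int) :
    ∀ (ps : List (Int × Int)) (m' m : Int), m' ≤ m →
    (∀ p ∈ ps, PySem.List.pyGetD times p.1 0 = p.2) →
    (recsP m' ps).filter (fun j => decide (m < PySem.List.pyGetD times j 0)) = recsP m ps := by
  intro ps
  induction ps with
  | nil => intro m' m _ _; simp [recsP]
  | cons p ps ih =>
    intro m' m hmm H
    have Hp : PySem.List.pyGetD times p.1 0 = p.2 := H p (by simp)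
    have Hps : ∀ q ∈ ps, PySem.List.pyGetD times q.1 0 = q.2 := fun q hq => H q (by simp [hq])
    simp only [recsP]
    by_cases h1 : m' < p.2
    · rw [if_pos h1]
      by_cases h2 : m < p.2
      · rw [if_pos h2]
        rw [List.filter_cons_of_pos (by simp [Hp, h2])]
        congr 1
        refine List.filter_eq_self.mpr ?_
        intro j hj
        simpa using lt_trans h2 (recsP_val_gt times ps p.2 j Hps hj)
      · rw [if_neg h2]
        rw [List.filter_cons_of_neg (by simp [Hp, h2])]
        exact ih p.2 m (by omega) Hps
    · rw [if_neg h1]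
      have h2 : ¬ m < p.2 := by omega
      rw [if_neg h2]
      exact ih m' m hmm Hps

-- records of an append: right records wrt the accumulated left maximum
lemma recsP_append :
    ∀ (pa pb : List (Int × Int)) (m : Int),
    recsP m (pa ++ pb) = recsP m pa ++ recsP (pa.foldl (fun a q => max a q.2) m) pb := by
  intro pa
  induction pa with
  | nil => intro pb m; simp [recsP]
  | cons p pa ih =>
    intro pb m
    simp only [List.cons_append, recsP, List.foldl_cons]
    by_cases h : m < p.2
    · rw [if_pos h, if_pos h, ih, max_eq_right (le_of_lt h), List.cons_append]
    · rw [if_neg h, if_neg h, ih, max_eq_left (le_of_not_gt h)]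

lemma foldl_max_max (l : List (Int × Int)) :
    ∀ (a b : Int), l.foldl (fun x q => max x q.2) (max a b) = max a (l.foldl (fun x q => max x q.2) b) := by
  induction l with
  | nil => intro a b; rfl
  | cons p l ih =>
    intro a b
    simp only [List.foldl_cons]
    rw [max_assoc, ih]

lemma maxP_append (pa pb : List (Int × Int)) (ha : pa ≠ []) (hb : pb ≠ []) :
    maxP (pa ++ pb) = max (maxP pa) (maxP pb) := by
  rcases pa with _ | ⟨p, pa⟩
  · exact absurd rfl ha
  rcases pb with _ | ⟨q, qb⟩
  · exact absurd rfl hb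
  simp only [maxP, List.cons_append, List.foldl_append, List.foldl_cons]
  rw [foldl_max_max]

-- values at enumerated positions of a slice of times agree with times
lemma enum_slice_val (times : List Int) (a k : Nat) (hk : a + k ≤ times.length) :
    ∀ p ∈ PySem.List.enumerate ((times.drop a).take k) (a : Int),
      PySem.List.pyGetD times p.1 0 = p.2 := by
  intro p hp
  rcases (PySem.List.mem_enumerate_iff _ _ _).mp hp with ⟨j, hj, rfl⟩
  have hlen : ((times.drop a).take k).length = k := by
    simp [List.length_take, List.length_drop]; omega
  have hj' : j < k := by omega
  have hval : ((times.drop a).take k)[j] = times[a + j]'(by omega) := by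
    simp [List.getElem_take, List.getElem_drop]
  have h0' : (0 : Int) ≤ (a : Int) + (j : Int) := by omega
  have h1' : (a : Int) + (j : Int) < (times.length : Int) := by omega
  rw [hval, PySem.List.pyGetD_eq_getElem times 0 h0' h1']
  simp only [show ((a : Int) + (j : Int)).toNat = a + j by omega]

-- recB computes record positions and the maximum of times[lo:hi]
lemma recB_spec (times : List Int) (lo hi : Int) (h0 : 0 ≤ lo) (hlh : lo < hi)
    (hhi : hi ≤ (times.length : Int)) :
    recB times lo hi =
      (recs0 (PySem.List.enumerate ((times.drop lo.toNat).take (hi - lo).toNat) lo),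
       maxP (PySem.List.enumerate ((times.drop lo.toNat).take (hi - lo).toNat) lo)) := by
  rw [recB]
  rw [dif_neg (by omega)]
  by_cases h1 : hi - lo = 1
  · rw [dif_pos h1, h1]
    have hlt : lo.toNat < times.length := by omega
    have hseg : (times.drop lo.toNat).take (1 : Int).toNat = [times[lo.toNat]] := by
      rw [List.drop_eq_getElem_cons hlt]
      rfl
    rw [hseg, PySem.List.enumerate_cons, PySem.List.enumerate_nil]
    simp only [recs0, recsP, maxP, List.foldl_nil]
    congr 1
    rw [PySem.List.pyGetD_eq_getElem times 0 h0 (by omega)]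
  · rw [dif_neg h1]
    have hm : PySem.Int.floordiv (lo + hi) 2 = (lo + hi) / 2 :=
      PySem.Int.floordiv_eq_ediv_of_pos (by norm_num)
    show ((recB times lo (PySem.Int.floordiv (lo + hi) 2)).1
            ++ (recB times (PySem.Int.floordiv (lo + hi) 2) hi).1.filter
                (fun i => decide ((recB times lo (PySem.Int.floordiv (lo + hi) 2)).2
                  < PySem.List.pyGetD times i 0)),
          max (recB times lo (PySem.Int.floordiv (lo + hi) 2)).2
              (recB times (PySem.Int.floordiv (lo + hi) 2) hi).2) = _
    set mid := PySem.Int.floordiv (lo + hi) 2 with hmid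
    have hb1 : lo < mid := by omega
    have hb2 : mid < hi := by omega
    rw [recB_spec times lo mid h0 hb1 (by omega),
        recB_spec times mid hi (by omega) hb2 hhi]
    dsimp only
    have hlenl : ((times.drop lo.toNat).take (mid - lo).toNat).length = (mid - lo).toNat := by
      simp [List.length_take, List.length_drop]; omega
    have hsplit : (times.drop lo.toNat).take (hi - lo).toNat
        = (times.drop lo.toNat).take (mid - lo).toNat
          ++ (times.drop mid.toNat).take (hi - mid).toNat := by
      rw [show (hi - lo).toNat = (mid - lo).toNat + (hi - mid).toNat by omega, List.take_add]
      congr 1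
      rw [List.drop_drop]
      congr 2
      omega
    have henum : PySem.List.enumerate ((times.drop lo.toNat).take (hi - lo).toNat) lo
        = PySem.List.enumerate ((times.drop lo.toNat).take (mid - lo).toNat) lo
          ++ PySem.List.enumerate ((times.drop mid.toNat).take (hi - mid).toNat) mid := by
      rw [hsplit, PySem.List.enumerate_append, hlenl]
      congr 2
      omega
    rw [henum]
    set L := (times.drop lo.toNat).take (mid - lo).toNat with hL
    set R := (times.drop mid.toNat).take (hi - mid).toNat with hR
    have hRlen : R.length = (hi - mid).toNat := by
      rw [hR]; simp [List.length_take, List.length_drop]; omega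
    have hEL : PySem.List.enumerate L lo ≠ [] := by
      intro hc
      have := congrArg List.length hc
      rw [PySem.List.length_enumerate] at this
      have : L.length = 0 := this
      omega
    have hER : PySem.List.enumerate R mid ≠ [] := by
      intro hc
      have := congrArg List.length hc
      rw [PySem.List.length_enumerate] at this
      have : R.length = 0 := this
      omega
    have HvalL : ∀ p ∈ PySem.List.enumerate L lo, PySem.List.pyGetD times p.1 0 = p.2 := by
      have := enum_slice_val times lo.toNat (mid - lo).toNat (by omega)
      rw [show ((lo.toNat : Nat) : Int) = lo by omega] at this
      exact this
    have HvalR : ∀ p ∈ PySem.List.enumerate R mid, PySem.List.pyGetD times p.1 0 = p.2 := by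
      have := enum_slice_val times mid.toNat (hi - mid).toNat (by omega)
      rw [show ((mid.toNat : Nat) : Int) = mid by omega] at this
      exact this
    obtain ⟨p, pl, hEl⟩ : ∃ x xs, PySem.List.enumerate L lo = x :: xs := by
      cases h : PySem.List.enumerate L lo with
      | nil => exact absurd h hEL
      | cons x xs => exact ⟨x, xs, rfl⟩
    obtain ⟨q, ql, hEr⟩ : ∃ x xs, PySem.List.enumerate R mid = x :: xs := by
      cases h : PySem.List.enumerate R mid with
      | nil => exact absurd h hER
      | cons x xs => exact ⟨x, xs, rfl⟩
    rw [hEl] at HvalL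
    rw [hEr] at HvalR
    have Hpl : ∀ x ∈ pl, PySem.List.pyGetD times x.1 0 = x.2 := fun x hx => HvalL x (by simp [hx])
    have Hq : PySem.List.pyGetD times q.1 0 = q.2 := HvalR q (by simp)
    have Hql : ∀ x ∈ ql, PySem.List.pyGetD times x.1 0 = x.2 := fun x hx => HvalR x (by simp [hx])
    rw [hEl, hEr]
    simp only [Prod.mk.injEq]
    refine ⟨?_, ?_⟩
    · -- record positions
      simp only [recs0, maxP, List.cons_append, recsP_append, List.cons.injEq, true_and]
      congr 1
      simp only [recsP]
      by_cases h2 : pl.foldl (fun a q => max a q.2) p.2 < q.2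
      · rw [if_pos h2]
        rw [List.filter_cons_of_pos (by simp [Hq, h2])]
        congr 1
        refine List.filter_eq_self.mpr ?_
        intro j hj
        simpa using lt_trans h2 (recsP_val_gt times ql q.2 j Hql hj)
      · rw [if_neg h2]
        rw [List.filter_cons_of_neg (by simp [Hq, h2])]
        exact recsP_filter times ql q.2 _ (by omega) Hql
    · exact (maxP_append (p :: pl) (q :: ql) (by simp) (by simp)).symm
termination_by (hi - lo).toNat
decreasing_by
  all_goals omega

-- B's record positions followed by differencing compute goBatch
lemma goBatch_recsP :
    ∀ (ts : List Int) (i m : Int) (s : List Int) (l : Int), 1 ≤ i - l →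
    diffs ((s ++ [l]) ++ recsP m (PySem.List.enumerate ts i) ++ [i + (ts.length : Int)])
    = diffs (s ++ [l]) ++ goBatch m (i - l) ts := by
  intro ts
  induction ts with
  | nil =>
    intro i m s l h
    simp only [PySem.List.enumerate_nil, recsP, List.length_nil, Nat.cast_zero, add_zero,
      List.append_nil]
    rw [show (s ++ [l]) ++ [i] = s ++ [l, i] by simp, diffs_append_last]
    simp [goBatch]
  | cons t ts ih =>
    intro i m s l h
    rw [PySem.List.enumerate_cons]
    simp only [recsP]
    by_cases hc : m < t
    · rw [if_pos hc]
      have hlen : i + ((t :: ts).length : Int) = (i + 1) + (ts.length : Int) := by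
        push_cast [List.length_cons]; ring
      rw [hlen]
      have := ih (i + 1) t (s ++ [l]) i (by omega)
      rw [show ((s ++ [l]) ++ [i]) = s ++ [l] ++ [i] by simp] at this
      rw [show (s ++ [l]) ++ (i :: recsP t (PySem.List.enumerate ts (i + 1))) ++ [(i+1) + (ts.length : Int)]
            = ((s ++ [l]) ++ [i]) ++ recsP t (PySem.List.enumerate ts (i + 1)) ++ [(i+1) + (ts.length : Int)] by simp]
      rw [this]
      rw [show s ++ [l] ++ [i] = s ++ [l, i] by simp, diffs_append_last]
      have hg : goBatch m (i - l) (t :: ts) = (i - l) :: goBatch t 1 ts := by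
        simp only [goBatch, if_neg (by omega : ¬ m ≥ t)]
      rw [hg, show i + 1 - i = (1 : Int) by ring]
      simp
    · rw [if_neg hc]
      have hlen : i + ((t :: ts).length : Int) = (i + 1) + (ts.length : Int) := by
        push_cast [List.length_cons]; ring
      rw [hlen]
      rw [ih (i + 1) m s l (by omega)]
      have hg : goBatch m (i - l) (t :: ts) = goBatch m (i - l + 1) ts := by
        simp only [goBatch, if_pos (by omega : m ≥ t)]
      rw [hg, show i + 1 - l = i - l + 1 by ring]

lemma both_goBatch (progresses speeds : List Int)
    (hne : progresses ≠ []) (hlen : progresses.length ≤ speeds.length) :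
    solution progresses speeds = solution_alt progresses speeds := by
  unfold solution solution_alt
  have hT := times_loop (fun a b => ceilDiv (100 - a) b) progresses speeds [] [] [] rfl hlen
  simp only [List.length_nil, Nat.cast_zero, zero_add, List.nil_append] at hT
  rw [hT]
  have hTlen : ((progresses.zip speeds).map
      (fun q => ceilDiv (100 - q.1) q.2)).length = progresses.length := by
    simp [List.length_zip]; omega
  cases hT' : (progresses.zip speeds).map (fun q => ceilDiv (100 - q.1) q.2) with
  | nil => rw [hT'] at hTlen; simp at hTlen; exact absurd (List.eq_nil_of_length_eq_zero hTlen.symm) hne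
  | cons t rest =>
    -- A side → goBatch
    simp only [PySem.List.pyGetD_zero_cons]
    rw [PySem.List.foldl_pyRange_pyGetD' (t :: rest) 0
      (fun (st : Int × Int × List Int) ti =>
        if st.1 ≥ ti then (st.1, st.2.1 + 1, st.2.2) else (ti, 1, st.2.2 ++ [st.2.1]))
      (t, 1, ([] : List Int)) (a := 1) (by omega)]
    simp only [Int.toNat_one, List.drop_succ_cons, List.drop_zero]
    rw [foldA_goBatch rest t 1 [] le_rfl]
    -- B side → goBatch
    have hrec := recB_spec (t :: rest) 0 ((t :: rest).length : Int)
      le_rfl (by simp) le_rfl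
    simp only [Int.toNat_zero, List.drop_zero, show ((((t :: rest).length : Int)) - 0).toNat
        = (t :: rest).length by omega, List.take_length] at hrec
    rw [hrec]
    dsimp only
    rw [PySem.List.enumerate_cons]
    simp only [recs0]
    rw [List.cons_append, PySem.List.slice_from_one, List.tail_cons]
    have hB := goBatch_recsP rest 1 t [] 0 (by omega)
    simp only [List.nil_append, sub_zero] at hB
    have hd0 : diffs [0] = [] := rfl
    rw [hd0] at hB
    show [] ++ goBatch t 1 rest
      = diffs ((0 : Int) :: (recsP t (PySem.List.enumerate rest (0 + 1)) ++ [((t :: rest).length : Int)]))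
    rw [show ((0 : Int) :: (recsP t (PySem.List.enumerate rest (0 + 1)) ++ [((t :: rest).length : Int)]))
          = [(0 : Int)] ++ recsP t (PySem.List.enumerate rest 1) ++ [1 + (rest.length : Int)] by
        push_cast [List.length_cons]
        simp [add_comm]]
    rw [hB]

-- ===== VERDICT (by name: the statement is the Claim_ definition above) =====
theorem solution_spec : Claim_equal_solution := by
  intro progresses speeds _ hpre
  obtain ⟨hne, hlen, -⟩ := hpre
  unfold Spec_solution
  exact both_goBatch progresses speeds hne hlen
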